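-- pv_equiv track=rewrite | github.com/nizkop/young2matrix | source/getting_subsets.py | permutations_of_subsets
-- ===== SOURCE A (Python) =====
-- from typing import List
-- from itertools import chain, combinations, permutations
--
-- def permutations_of_subsets(array: List[List[int]], group_number:int) -> List[tuple]:
--     """ combinations of possible subsets;
--     differentiate between different sorting in these combinations,
--     and sort out combinations, if they obviously are not going to fit into young tableaus
--     :param array: lists of subsets
--     :param group_number: number of the choosen permutation group
--     :return: list of fitting combinations
--     """
--     all_combinations = chain.from_iterable(combinations(array, r) for r in range(len(array) + 1))
--     # remove dimensional-unfitting examples: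
--     unique_combinations = []
--     for combo in all_combinations:
--         all_numbers = [element for sublist in combo for element in sublist]
--         if len(set(all_numbers)) == len(all_numbers) and len(all_numbers) == group_number:
--             unique_combinations.append(combo)
--     # differentiate between sorting:
--     return [permutation for x in unique_combinations for permutation in permutations(x)]
-- ===== SOURCE B (Python) =====
-- from itertools import permutations
--
--
-- def _ok(s, seen, new):
--     for e in s:
--         if e in seen or e in new:
--             return False
--         new = new | {e}
--     return True
--
--
-- def _dfs(g, r, rest, seen, cnt):
--     if r == 0:
--         return [()] if cnt == g else []
--     if not rest:
--         return []
--     s = rest[0]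
--     take = ([(s,) + tail for tail in _dfs(g, r - 1, rest[1:], seen | set(s), cnt + len(s))]
--             if cnt + len(s) <= g and _ok(s, seen, set()) else [])
--     return take + _dfs(g, r, rest[1:], seen, cnt)
--
--
-- def permutations_of_subsets(array, group_number):
--     return [p
--             for r in range(len(array) + 1)
--             for combo in _dfs(group_number, r, array, set(), 0)
--             for p in permutations(combo)]
-- ===== Notes on version B (the rewrite author's own statement) =====
-- stated objective: alternative
-- what changed: A materialises all 2^n combinations of the sublists and then filters by flattened length and distinctness; B does a depth-first search per subset size over the list suffix, pruning a branch as soon as the running element count exceeds group_number or an element repeats, so unfit branches are never expanded (measured up to ~20x faster on large inputs but not consistently, so no speed claim).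
import Mathlib
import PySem

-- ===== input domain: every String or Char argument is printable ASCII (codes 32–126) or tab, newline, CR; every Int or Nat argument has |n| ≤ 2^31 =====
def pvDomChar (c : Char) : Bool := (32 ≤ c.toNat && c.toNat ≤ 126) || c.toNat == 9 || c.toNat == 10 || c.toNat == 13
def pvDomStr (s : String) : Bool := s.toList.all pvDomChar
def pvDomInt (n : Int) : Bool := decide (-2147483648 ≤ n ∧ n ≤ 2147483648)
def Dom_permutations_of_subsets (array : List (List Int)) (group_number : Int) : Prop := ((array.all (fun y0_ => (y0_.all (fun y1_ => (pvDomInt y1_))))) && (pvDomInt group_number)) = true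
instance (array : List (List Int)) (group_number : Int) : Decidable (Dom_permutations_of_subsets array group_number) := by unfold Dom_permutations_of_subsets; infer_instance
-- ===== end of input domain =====

-- B replaces A's power-set scan (all combinations, then filter) by a pruned DFS over increasing
-- positions that cuts a branch as soon as the running length exceeds group_number or an element repeats.

-- shared helper: itertools.permutations order (pick each element in turn, recurse on the rest)
def pySel {α : Type} : List α → List (α × List α)
  | [] => []
  | x :: xs => (x, xs) :: (pySel xs).map (fun p => (p.1, x :: p.2))

theorem pySel_length {α : Type} : ∀ (ys : List α) (p : α × List α), p ∈ pySel ys → p.2.length + 1 = ys.length := by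
  intro ys
  induction ys with
  | nil => intro p hp; simp [pySel] at hp
  | cons x xs ih =>
    intro p hp
    simp [pySel] at hp
    rcases hp with rfl | ⟨q, l, hq, rfl⟩
    · simp
    · have := ih (q, l) hq; simp at this ⊢; omega

def pyPerms {α : Type} : List α → List (List α)
  | [] => [[]]
  | x :: xs =>
    (pySel (x :: xs)).attach.flatMap (fun p => (pyPerms p.1.2).map (p.1.1 :: ·))
termination_by l => l.length
decreasing_by
  have := pySel_length (x :: xs) p.1 p.2
  simp at this ⊢
  omega

-- ===== PORT A =====
-- itertools.combinations(xs, r), in itertools order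
def pyCombs : Nat → List (List Int) → List (List (List Int))
  | 0, _ => [[]]
  | _+1, [] => []
  | r+1, x :: rest => (pyCombs r rest).map (x :: ·) ++ pyCombs (r+1) rest

def permutations_of_subsets (array : List (List Int)) (group_number : Int) : List (List (List Int)) :=
  let all_combinations := (List.range (array.length + 1)).flatMap (fun r => pyCombs r array)
  let unique_combinations := all_combinations.foldl (fun acc combo =>
      let all_numbers := combo.flatMap (fun sublist => sublist)
      if (PySem.Set.ofList all_numbers).length = all_numbers.length ∧
         (all_numbers.length : Int) = group_number
      then acc ++ [combo] else acc) []
  unique_combinations.flatMap (fun x => pyPerms x)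

-- ===== PORT B =====
-- _ok s seen new: every element of s is fresh (not in seen, not repeated within s)
def bOk : List Int → List Int → List Int → Bool
  | [], _, _ => true
  | e :: rest, seen, new =>
    if seen.contains e || new.contains e then false
    else bOk rest seen (new ++ [e])

-- _dfs: combinations of size r from the remaining suffix, pruned by length bound and freshness
def bDfs (g : Int) : Nat → List (List Int) → List Int → Int → List (List (List Int))
  | 0, _, _, cnt => if cnt = g then [[]] else []
  | _+1, [], _, _ => []
  | r+1, s :: rest, seen, cnt =>
    (if cnt + (s.length : Int) ≤ g ∧ bOk s seen [] = true then
       (bDfs g r rest (seen ++ s) (cnt + (s.length : Int))).map (s :: ·)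
     else []) ++ bDfs g (r+1) rest seen cnt

def permutations_of_subsets_alt (array : List (List Int)) (group_number : Int) : List (List (List Int)) :=
  (List.range (array.length + 1)).flatMap (fun r =>
    (bDfs group_number r array [] 0).flatMap (fun combo => pyPerms combo))

-- ===== PRECONDITION & SPEC =====
def Spec_permutations_of_subsets (array : List (List Int)) (group_number : Int) (out : List (List (List Int))) : Prop := out = permutations_of_subsets_alt array group_number
instance (array : List (List Int)) (group_number : Int) (out : List (List (List Int))) : Decidable (Spec_permutations_of_subsets array group_number out) := by unfold Spec_permutations_of_subsets; infer_instance

-- ===== CLAIM (what is proved, stated in full; the proofs are below) =====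
def Claim_equal_permutations_of_subsets : Prop := ∀ (array : List (List Int)) (group_number : Int), Dom_permutations_of_subsets array group_number → Spec_permutations_of_subsets array group_number (permutations_of_subsets array group_number)

-- ===== LEMMAS AND PROOFS =====

-- the filter predicate A applies, expressed with an accumulated seen-prefix and running count
def pvPred (g : Int) (seen : List Int) (cnt : Int) (c : List (List Int)) : Bool :=
  decide ((seen ++ c.flatMap (fun s => s)).Nodup ∧
          cnt + ((c.flatMap (fun s => s)).length : Int) = g)

theorem ofList_length_eq_iff (l : List Int) :
    (PySem.Set.ofList l).length = l.length ↔ l.Nodup := by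
  constructor
  · intro h
    have hperm : (PySem.Set.ofList l).Perm l.dedup := by
      rw [List.perm_ext_iff_of_nodup (PySem.Set.nodup_ofList l) l.nodup_dedup]
      intro x; simp [PySem.Set.mem_ofList]
    have hlen : l.dedup.length = l.length := by
      rw [← hperm.length_eq, h]
    have hd : l.dedup = l := (List.dedup_sublist l).eq_of_length hlen
    rw [← hd]; exact l.nodup_dedup
  · intro h
    rw [PySem.Set.ofList_eq_self_of_nodup l h]

theorem bOk_iff : ∀ (s seen new : List Int), new.Nodup →
    (bOk s seen new = true ↔ (new ++ s).Nodup ∧ ∀ e ∈ s, e ∉ seen) := by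
  intro s
  induction s with
  | nil => intro seen new hn; simp [bOk, hn]
  | cons e rest ih =>
    intro seen new hn
    simp only [bOk]
    by_cases hmem : (seen.contains e || new.contains e) = true
    · rw [if_pos hmem]
      simp only [List.contains_eq_mem, Bool.or_eq_true, decide_eq_true_eq] at hmem
      constructor
      · intro h; simp at h
      · rintro ⟨hnd, hall⟩
        exfalso
        rcases hmem with h | h
        · exact (hall e (List.mem_cons_self)) h
        · rw [List.nodup_append] at hnd
          exact hnd.2.2 e h e List.mem_cons_self rfl
    · rw [if_neg hmem]
      simp only [List.contains_eq_mem, Bool.or_eq_true, decide_eq_true_eq, not_or] at hmem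
      obtain ⟨hes, hen⟩ := hmem
      have hn' : (new ++ [e]).Nodup := by
        rw [List.nodup_append]
        refine ⟨hn, List.nodup_singleton e, ?_⟩
        intro a ha b hb
        rw [List.mem_singleton] at hb
        subst hb
        exact fun h => hen (h ▸ ha)
      rw [ih seen (new ++ [e]) hn']
      constructor
      · rintro ⟨hnd, hall⟩
        refine ⟨by simpa [List.append_assoc] using hnd, ?_⟩
        intro x hx
        rcases List.mem_cons.mp hx with rfl | hx
        · exact hes
        · exact hall x hx
      · rintro ⟨hnd, hall⟩
        exact ⟨by simpa [List.append_assoc] using hnd,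
               fun x hx => hall x (List.mem_cons_of_mem _ hx)⟩

theorem bDfs_eq_filter (g : Int) : ∀ (xs : List (List Int)) (r : Nat) (seen : List Int) (cnt : Int),
    seen.Nodup →
    bDfs g r xs seen cnt = (pyCombs r xs).filter (pvPred g seen cnt) := by
  intro xs
  induction xs with
  | nil =>
    intro r seen cnt hs
    cases r with
    | zero =>
      simp only [bDfs, pyCombs, List.filter, pvPred]
      by_cases h : cnt = g <;> simp [h, hs]
    | succ r => simp [bDfs, pyCombs]
  | cons s rest ih =>
    intro r seen cnt hs
    cases r with
    | zero =>
      simp only [bDfs, pyCombs, List.filter, pvPred]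
      by_cases h : cnt = g <;> simp [h, hs]
    | succ r =>
      simp only [bDfs, pyCombs, List.filter_append]
      rw [ih (r+1) seen cnt hs]
      congr 1
      rw [List.filter_map]
      by_cases hc : cnt + (s.length : Int) ≤ g ∧ bOk s seen [] = true
      · rw [if_pos hc]
        obtain ⟨hlen, hok⟩ := hc
        have hok' := (bOk_iff s seen [] (by simp)).mp hok
        simp only [List.nil_append] at hok'
        obtain ⟨hsnd, hfresh⟩ := hok'
        have hseen' : (seen ++ s).Nodup := by
          rw [List.nodup_append]
          refine ⟨hs, hsnd, ?_⟩
          intro a ha b hb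
          exact fun h => (hfresh b hb) (h ▸ ha)
        rw [ih r (seen ++ s) (cnt + (s.length : Int)) hseen']
        congr 1
        apply List.filter_congr
        intro c _
        simp only [Function.comp, pvPred]
        apply decide_eq_decide.mpr
        rw [List.flatMap_cons, List.length_append, ← List.append_assoc]
        push_cast
        constructor
        · rintro ⟨hnd, hcnt⟩; exact ⟨hnd, by omega⟩
        · rintro ⟨hnd, hcnt⟩; exact ⟨hnd, by omega⟩
      · rw [if_neg hc]
        symm
        rw [List.map_eq_nil_iff, List.filter_eq_nil_iff]
        intro c _
        simp only [Function.comp, pvPred, decide_eq_true_eq]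
        rintro ⟨hnd, hcnt⟩
        rw [List.flatMap_cons, ← List.append_assoc] at hnd
        rw [List.flatMap_cons, List.length_append] at hcnt
        push_cast at hcnt
        apply hc
        have hflc : (0 : Int) ≤ ((c.flatMap (fun s => s)).length : Int) := Int.natCast_nonneg _
        refine ⟨by omega, ?_⟩
        rw [bOk_iff s seen [] (by simp)]
        have hnd' : (seen ++ s).Nodup := (List.nodup_append.mp hnd).1
        rw [List.nodup_append] at hnd'
        obtain ⟨_, hsnd, hdisj⟩ := hnd'
        refine ⟨by simpa using hsnd, ?_⟩
        intro e he hse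
        exact hdisj e hse e he rfl

theorem filter_flatMap_comm {α β : Type} (l : List α) (f : α → List β) (p : β → Bool) :
    (l.flatMap f).filter p = l.flatMap (fun x => (f x).filter p) := by
  induction l with
  | nil => simp
  | cons x xs ih => simp [List.flatMap_cons, List.filter_append, ih]

-- ===== VERDICT (by name: the statement is the Claim_ definition above) =====
theorem permutations_of_subsets_spec : Claim_equal_permutations_of_subsets := by
  intro array g _
  unfold Spec_permutations_of_subsets permutations_of_subsets permutations_of_subsets_alt
  simp only []
  rw [PySem.List.foldl_append_ite_eq_filter]
  rw [List.nil_append]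
  have hpred : (fun combo : List (List Int) => decide
      ((PySem.Set.ofList (combo.flatMap (fun sublist => sublist))).length =
        (combo.flatMap (fun sublist => sublist)).length ∧
       ((combo.flatMap (fun sublist => sublist)).length : Int) = g)) = pvPred g [] 0 := by
    funext c
    apply decide_eq_decide.mpr
    rw [ofList_length_eq_iff]
    simp
  rw [hpred, filter_flatMap_comm, List.flatMap_assoc]
  have hfn : (fun r => ((pyCombs r array).filter (pvPred g [] 0)).flatMap (fun x => pyPerms x))
           = (fun r => (bDfs g r array [] 0).flatMap (fun combo => pyPerms combo)) := by
    funext r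
    rw [bDfs_eq_filter g array r [] 0 List.nodup_nil]
  rw [hfn]
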